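-- pv_equiv track=rewrite | github.com/y3s-study/algorithm-python | src/yj/baekjoon/p13325/solution.py | update_edge
-- ===== SOURCE A (Python) =====
-- def update_edge(edges: list, index: int):
--     left_index = index * 2 + 1
--     right_index = index * 2 + 2
--
--     if left_index >= len(edges):
--         return edges[index]
--
--     left_max = update_edge(edges, left_index)
--     right_max = update_edge(edges, right_index)
--
--     total_max = max(right_max, left_max)
--
--     edges[left_index] += (total_max - left_max)
--     edges[right_index] += (total_max - right_max)
--
--     return edges[index] + total_max
-- ===== SOURCE B (Python) =====
-- def update_edge(edges: list, index: int):
--     # Iterative bottom-up DP over heap indices; does not mutate `edges`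
--     # (A mutates it in place; the equivalence is about the return value only).
--     n = len(edges)
--     h = [0] * n
--     for j in range(n - 1, -1, -1):
--         kids = [c for c in (2 * j + 1, 2 * j + 2) if c < n]
--         h[j] = edges[j] + (max(h[c] for c in kids) if kids else 0)
--     return h[index]
-- ===== Notes on version B (the rewrite author's own statement) =====
-- stated objective: alternative
-- what changed: Replaces A's mutating top-down recursion with a non-mutating iterative bottom-up DP over heap indices (a single reversed loop filling an array h), returning h[index].
import Mathlib
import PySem

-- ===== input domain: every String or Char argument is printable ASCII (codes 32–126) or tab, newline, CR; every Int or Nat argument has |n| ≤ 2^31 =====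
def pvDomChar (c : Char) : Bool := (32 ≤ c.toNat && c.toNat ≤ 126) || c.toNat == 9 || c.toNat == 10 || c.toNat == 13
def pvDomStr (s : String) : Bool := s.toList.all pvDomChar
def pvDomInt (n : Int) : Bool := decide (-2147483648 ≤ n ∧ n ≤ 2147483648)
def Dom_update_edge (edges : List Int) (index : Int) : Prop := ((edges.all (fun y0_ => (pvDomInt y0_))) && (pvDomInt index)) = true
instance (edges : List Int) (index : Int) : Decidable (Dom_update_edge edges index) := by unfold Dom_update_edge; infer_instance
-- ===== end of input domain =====

-- B replaces A's mutating top-down recursion by a non-mutating bottom-up array DP;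
-- A mutates `edges` in place (B does not): the equivalence proved here is about the return value only.

-- ===== PORT A =====
-- A mutates the list, so its port threads the list through a recursion returning
-- (updated list, value); `none` = the Python call raises. Fuel only makes the
-- recursion total; wherever the Python returns, fuel `edges.length + 1` is enough.
def pyAddAt (xs : List Int) (i : Int) (v : Int) : Option (List Int) :=
  match PySem.List.pyGet? xs i with
  | none => none
  | some x => PySem.List.pySet? xs i (x + v)

def updA : Nat → List Int → Int → Option (List Int × Int)
  | 0, _, _ => none
  | fuel + 1, edges, index =>
    let left_index := index * 2 + 1
    let right_index := index * 2 + 2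
    if left_index ≥ (edges.length : Int) then
      (PySem.List.pyGet? edges index).map (fun v => (edges, v))
    else
      match updA fuel edges left_index with
      | none => none
      | some (e1, left_max) =>
        match updA fuel e1 right_index with
        | none => none
        | some (e2, right_max) =>
          let total_max := max right_max left_max
          match pyAddAt e2 left_index (total_max - left_max) with
          | none => none
          | some e3 =>
            match pyAddAt e3 right_index (total_max - right_max) with
            | none => none
            | some e4 => (PySem.List.pyGet? e4 index).map (fun v => (e4, v + total_max))

def update_edge (edges : List Int) (index : Int) : Int :=
  ((updA (edges.length + 1) edges index).map Prod.snd).getD 0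

-- ===== PORT B =====
-- one step of B's reversed loop body: h[j] = edges[j] + (max over in-range children of h)
def stepB (n : Nat) (edges : List Int) (h : List Int) (j : Nat) : List Int :=
  let kids := [2 * j + 1, 2 * j + 2].filter (fun c => c < n)
  h.set j (edges.getD j 0 +
    if kids.isEmpty then 0 else ((kids.map (fun c => h.getD c 0)).max?).getD 0)

def update_edge_alt (edges : List Int) (index : Int) : Int :=
  let n := edges.length
  let h := ((List.range n).reverse).foldl (stepB n edges) (List.replicate n 0)
  (PySem.List.pyGet? h index).getD 0

-- ===== PRECONDITION & SPEC =====
-- `Anc i j`: node i is an ancestor (or equal) of node j in the 0-based heap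
-- (1-based positions: i+1 is obtained from j+1 by repeated halving).
def Anc (i j : Nat) : Prop := ∃ k, k ≤ j ∧ (j + 1) / 2 ^ k = i + 1

-- Pre_ = exactly the inputs on which the Python A returns: index in range, and the
-- subtree of `index` avoids the even-length boundary node (len-2)/2, whose call
-- reads edges[len] and raises IndexError.
def Pre_update_edge (edges : List Int) (index : Int) : Prop :=
  0 ≤ index ∧ index < (edges.length : Int) ∧
    ¬ (edges.length % 2 = 0 ∧ Anc index.toNat ((edges.length - 2) / 2))

instance (edges : List Int) (index : Int) : Decidable (Pre_update_edge edges index) := by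
  unfold Pre_update_edge Anc; infer_instance

def pvWitness_update_edge : List Int × Int := ([5, 3, 4], 0)

def Spec_update_edge (edges : List Int) (index : Int) (out : Int) : Prop := out = update_edge_alt edges index
instance (edges : List Int) (index : Int) (out : Int) : Decidable (Spec_update_edge edges index out) := by unfold Spec_update_edge; infer_instance

-- ===== CLAIM (what is proved, stated in full; the proofs are below) =====
def Claim_equal_update_edge : Prop := ∀ (edges : List Int) (index : Int), Dom_update_edge edges index → Pre_update_edge edges index → Spec_update_edge edges index (update_edge edges index)

-- ===== LEMMAS AND PROOFS =====

theorem anc_iff (i j : Nat) : Anc i j ↔ ∃ k, (j + 1) / 2 ^ k = i + 1 := by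
  constructor
  · rintro ⟨k, _, hk⟩; exact ⟨k, hk⟩
  · rintro ⟨k, hk⟩
    refine ⟨k, ?_, hk⟩
    have h1 : 2 ^ k ≤ j + 1 := by
      by_contra h
      rw [Nat.div_eq_of_lt (by omega)] at hk; omega
    have h2 : k < 2 ^ k := Nat.lt_two_pow_self
    omega

theorem anc_self (i : Nat) : Anc i i := ⟨0, by simp⟩

theorem anc_left (i : Nat) : Anc i (2 * i + 1) :=
  (anc_iff _ _).2 ⟨1, by omega⟩

theorem anc_right (i : Nat) : Anc i (2 * i + 2) :=
  (anc_iff _ _).2 ⟨1, by omega⟩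

theorem anc_le {i j : Nat} (h : Anc i j) : i ≤ j := by
  obtain ⟨k, -, hk⟩ := h
  have := Nat.div_le_self (j + 1) (2 ^ k)
  omega

theorem anc_trans {a b c : Nat} (h1 : Anc a b) (h2 : Anc b c) : Anc a c := by
  obtain ⟨m, hm⟩ := (anc_iff _ _).1 h1
  obtain ⟨k, hk⟩ := (anc_iff _ _).1 h2
  refine (anc_iff _ _).2 ⟨k + m, ?_⟩
  rw [pow_add, ← Nat.div_div_eq_div_mul, hk, hm]

theorem anc_total {a b c : Nat} (h1 : Anc a c) (h2 : Anc b c) : Anc a b ∨ Anc b a := by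
  obtain ⟨k, hk⟩ := (anc_iff _ _).1 h1
  obtain ⟨m, hm⟩ := (anc_iff _ _).1 h2
  rcases le_total k m with h | h
  · right
    refine (anc_iff _ _).2 ⟨m - k, ?_⟩
    have : (c + 1) / 2 ^ m = ((c + 1) / 2 ^ k) / 2 ^ (m - k) := by
      rw [Nat.div_div_eq_div_mul, ← pow_add]; congr 2; omega
    rw [hm, hk] at this; omega
  · left
    refine (anc_iff _ _).2 ⟨k - m, ?_⟩
    have : (c + 1) / 2 ^ k = ((c + 1) / 2 ^ m) / 2 ^ (k - m) := by
      rw [Nat.div_div_eq_div_mul, ← pow_add]; congr 2; omega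
    rw [hm, hk] at this; omega

theorem not_anc_of_lt {i j : Nat} (h : j < i) : ¬ Anc i j := fun ha => by
  have := anc_le ha; omega

theorem not_anc_left_right (i : Nat) : ¬ Anc (2 * i + 1) (2 * i + 2) := by
  rintro ⟨k, -, hk⟩
  match k with
  | 0 =>
    rw [pow_zero, Nat.div_one] at hk; omega
  | k + 1 =>
    have heq : (2 * i + 2 + 1) / 2 ^ (k + 1) = (i + 1) / 2 ^ k := by
      rw [pow_succ', ← Nat.div_div_eq_div_mul]
      congr 1; omega
    rw [heq] at hk
    have h2 := Nat.div_le_self (i + 1) (2 ^ k)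
    omega

-- subtrees of the two children are disjoint
theorem anc_disjoint {i j : Nat} (h1 : Anc (2 * i + 1) j) (h2 : Anc (2 * i + 2) j) : False := by
  rcases anc_total h1 h2 with h | h
  · exact not_anc_left_right i h
  · exact not_anc_of_lt (by omega) h

-- "subtree of i avoids the boundary node of an even-length array"
def okN (n i : Nat) : Prop := ¬ (n % 2 = 0 ∧ Anc i ((n - 2) / 2))

theorem okN_left {n i : Nat} (h : okN n i) : okN n (2 * i + 1) :=
  fun ⟨he, ha⟩ => h ⟨he, anc_trans (anc_left i) ha⟩

theorem okN_right {n i : Nat} (h : okN n i) : okN n (2 * i + 2) :=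
  fun ⟨he, ha⟩ => h ⟨he, anc_trans (anc_right i) ha⟩

theorem okN_no_boundary {n i : Nat} (h : okN n i) (_hl : 2 * i + 1 < n) : 2 * i + 2 ≠ n := by
  intro he
  refine h ⟨by omega, ?_⟩
  have hh : (n - 2) / 2 = i := by omega
  rw [hh]; exact anc_self i

-- the pure value A returns (computed over the list as it stood at the call)
def gval (n : Nat) (es : List Int) (i : Nat) : Int :=
  if _h : 2 * i + 1 < n then
    es.getD i 0 + max (gval n es (2 * i + 2)) (gval n es (2 * i + 1))
  else es.getD i 0
termination_by n - i
decreasing_by all_goals omega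

theorem gval_congr (k n : Nat) (es1 es2 : List Int) (i : Nat)
    (hk : n - i ≤ k)
    (hag : ∀ j, Anc i j → es1.getD j 0 = es2.getD j 0) :
    gval n es1 i = gval n es2 i := by
  induction k generalizing i with
  | zero =>
    conv_lhs => rw [gval]
    conv_rhs => rw [gval]
    have : ¬ 2 * i + 1 < n := by omega
    simp only [this, dif_neg, not_false_iff]
    exact hag i (anc_self i)
  | succ k ih =>
    conv_lhs => rw [gval]
    conv_rhs => rw [gval]
    by_cases h : 2 * i + 1 < n
    · simp only [h, dif_pos]
      rw [hag i (anc_self i),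
        ih (2 * i + 1) (by omega) (fun j hj => hag j (anc_trans (anc_left i) hj)),
        ih (2 * i + 2) (by omega) (fun j hj => hag j (anc_trans (anc_right i) hj))]
    · simp only [h, dif_neg, not_false_iff]
      exact hag i (anc_self i)

-- getD through set at a different index
theorem getD_set_ne (l : List Int) (m j : Nat) (v : Int) (h : j ≠ m) :
    (l.set m v).getD j 0 = l.getD j 0 := by
  simp [List.getD, List.getElem?_set_ne (by omega : m ≠ j)]

theorem getD_set_self (l : List Int) (m : Nat) (v : Int) (h : m < l.length) :
    (l.set m v).getD m 0 = v := by
  simp [List.getD, h]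

-- ===== the A-side invariant =====
theorem pyAddAt_natCast (xs : List Int) (m : Nat) (v : Int) (h : m < xs.length) :
    pyAddAt xs (m : Int) v = some (xs.set m (xs.getD m 0 + v)) := by
  simp [pyAddAt, PySem.List.pySet?_natCast, h, List.getD]

theorem updA_spec (fuel : Nat) :
    ∀ (es : List Int) (i : Nat), i < es.length → okN es.length i →
    es.length - i < fuel →
    ∃ es', updA fuel es (i : Int) = some (es', gval es.length es i) ∧
      es'.length = es.length ∧
      ∀ j : Nat, ¬ (Anc i j ∧ j ≠ i) → es'.getD j 0 = es.getD j 0 := by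
  induction fuel with
  | zero => intro es i _ _ h; omega
  | succ fuel ih =>
    intro es i hi hok hfuel
    rw [updA]
    simp only []
    by_cases hleaf : 2 * i + 1 < es.length
    · -- internal node
      have hcast : ¬ ((i : Int) * 2 + 1 ≥ (es.length : Int)) := by omega
      rw [if_neg hcast]
      have hli : ((i : Int) * 2 + 1) = ((2 * i + 1 : Nat) : Int) := by push_cast; ring
      have hri : ((i : Int) * 2 + 2) = ((2 * i + 2 : Nat) : Int) := by push_cast; ring
      have hrin : 2 * i + 2 < es.length := by
        have := okN_no_boundary hok hleaf; omega
      obtain ⟨e1, hA1, hlen1, hag1⟩ :=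
        ih es (2 * i + 1) hleaf (okN_left hok) (by omega)
      obtain ⟨e2, hA2, hlen2, hag2⟩ :=
        ih e1 (2 * i + 2) (by omega) (by rw [hlen1]; exact okN_right hok) (by omega)
      rw [hlen1] at hA2 hlen2
      -- the right value over e1 equals it over the original list
      have hg2 : gval es.length e1 (2 * i + 2) = gval es.length es (2 * i + 2) := by
        refine gval_congr es.length es.length e1 es (2 * i + 2) (by omega) ?_
        intro j hj
        refine hag1 j ?_
        rintro ⟨hlj, hne⟩
        exact anc_disjoint hlj hj
      rw [hg2] at hA2
      set lm := gval es.length es (2 * i + 1) with hlm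
      set rm := gval es.length es (2 * i + 2) with hrm
      set tm := max rm lm with htm
      set e3 : List Int := e2.set (2 * i + 1) (e2.getD (2 * i + 1) 0 + (tm - lm)) with he3
      set e4 : List Int := e3.set (2 * i + 2) (e3.getD (2 * i + 2) 0 + (tm - rm)) with he4
      have h3 : pyAddAt e2 ((2 * i + 1 : Nat) : Int) (tm - lm) = some e3 :=
        pyAddAt_natCast e2 (2 * i + 1) (tm - lm) (by omega)
      have h4 : pyAddAt e3 ((2 * i + 2 : Nat) : Int) (tm - rm) = some e4 :=
        pyAddAt_natCast e3 (2 * i + 2) (tm - rm) (by simp [he3]; omega)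
      have hlen4 : e4.length = es.length := by simp [he4, he3]; omega
      have h5 : PySem.List.pyGet? e4 (i : Int) = some (e4.getD i 0) := by
        rw [PySem.List.pyGet?_natCast]
        simp [List.getD, List.getElem?_eq_getElem (by omega : i < e4.length)]
      have hgi : e4.getD i 0 = es.getD i 0 := by
        rw [he4, getD_set_ne _ _ _ _ (by omega), he3, getD_set_ne _ _ _ _ (by omega)]
        rw [hag2 i (by rintro ⟨ha, -⟩; exact not_anc_of_lt (by omega) ha),
          hag1 i (by rintro ⟨ha, -⟩; exact not_anc_of_lt (by omega) ha)]
      have hval : e4.getD i 0 + tm = gval es.length es i := by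
        conv_rhs => rw [gval]
        rw [dif_pos hleaf, hgi]
      refine ⟨e4, ?_, hlen4, ?_⟩
      · simp only [hli, hri, hA1, hA2, ← htm, h3, h4, h5, Option.map_some]
        rw [hval]
      · intro j hj
        have hj1 : j ≠ 2 * i + 1 := by
          rintro rfl; exact hj ⟨anc_left i, by omega⟩
        have hj2 : j ≠ 2 * i + 2 := by
          rintro rfl; exact hj ⟨anc_right i, by omega⟩
        rw [he4, getD_set_ne _ _ _ _ hj2, he3, getD_set_ne _ _ _ _ hj1]
        rw [hag2 j ?_, hag1 j ?_]
        · rintro ⟨ha, -⟩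
          exact hj ⟨anc_trans (anc_left i) ha, by have := anc_le ha; omega⟩
        · rintro ⟨ha, -⟩
          exact hj ⟨anc_trans (anc_right i) ha, by have := anc_le ha; omega⟩
    · -- leaf
      have hcast : ((i : Int) * 2 + 1 ≥ (es.length : Int)) := by omega
      rw [if_pos hcast]
      have hget : PySem.List.pyGet? es (i : Int) = some (es.getD i 0) := by
        rw [PySem.List.pyGet?_natCast]
        simp [List.getD, List.getElem?_eq_getElem hi]
      refine ⟨es, ?_, rfl, fun _ _ => rfl⟩
      rw [hget, gval]
      simp [hleaf]

-- ===== the B-side invariant =====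
theorem stepB_length (n : Nat) (es h : List Int) (j : Nat) :
    (stepB n es h j).length = h.length := by
  simp [stepB]

theorem foldl_stepB_length (n : Nat) (es : List Int) (l : List Nat) :
    ∀ h : List Int, (l.foldl (stepB n es) h).length = h.length := by
  induction l with
  | nil => intro h; rfl
  | cons a t ih => intro h; rw [List.foldl_cons, ih, stepB_length]

theorem B_inv (n : Nat) (es : List Int) :
    ∀ (m : Nat) (h : List Int), h.length = n →
    (∀ k, m ≤ k → k < n → okN n k → h.getD k 0 = gval n es k) →
    ∀ k, k < n → okN n k →
      (((List.range m).reverse).foldl (stepB n es) h).getD k 0 = gval n es k := by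
  intro m
  induction m with
  | zero =>
    intro h _ hyp k hk hok
    simpa using hyp k (Nat.zero_le k) hk hok
  | succ m ih =>
    intro h hlen hyp k hk hok
    rw [List.range_succ, List.reverse_append, List.reverse_singleton,
      List.singleton_append, List.foldl_cons]
    refine ih (stepB n es h m) (by rw [stepB_length, hlen]) ?_ k hk hok
    intro k hmk hkn hokk
    rcases Nat.lt_or_ge m k with hlt | hge
    · rw [stepB, getD_set_ne _ _ _ _ (by omega)]
      exact hyp k (by omega) hkn hokk
    · have hkm : k = m := by omega
      subst hkm
      simp only [stepB]
      rw [getD_set_self _ _ _ (by omega)]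
      by_cases h1 : 2 * k + 1 < n
      · have h2 : 2 * k + 2 < n := by
          have := okN_no_boundary hokk h1; omega
        have hfil : [2 * k + 1, 2 * k + 2].filter (fun c => c < n) = [2 * k + 1, 2 * k + 2] := by
          simp [List.filter, h1, h2]
        rw [hfil]
        simp only [List.isEmpty_cons, List.map_cons, List.map_nil, Bool.false_eq_true, if_false]
        have hmax : ([h.getD (2 * k + 1) 0, h.getD (2 * k + 2) 0].max?).getD 0 =
            max (h.getD (2 * k + 1) 0) (h.getD (2 * k + 2) 0) := by
          simp [List.max?]
        rw [hmax,
          hyp (2 * k + 1) (by omega) h1 (okN_left hokk),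
          hyp (2 * k + 2) (by omega) h2 (okN_right hokk)]
        conv_rhs => rw [gval]
        rw [dif_pos h1, max_comm]
      · have h2 : ¬ 2 * k + 2 < n := by omega
        have hfil : [2 * k + 1, 2 * k + 2].filter (fun c => c < n) = [] := by
          simp [List.filter, h1, h2]
        rw [hfil]
        simp only [List.isEmpty_nil, if_true, add_zero]
        conv_rhs => rw [gval]
        rw [dif_neg h1]

-- ===== VERDICT (by name: the statement is the Claim_ definition above) =====
theorem update_edge_spec : Claim_equal_update_edge := by
  intro edges index _ hpre
  obtain ⟨h0, hlt, hok⟩ := hpre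
  unfold Spec_update_edge
  set i : Nat := index.toNat with hi
  have hidx : index = (i : Int) := by omega
  have hilen : i < edges.length := by omega
  have hokN : okN edges.length i := hok
  -- A computes gval
  obtain ⟨es', hA, -, -⟩ :=
    updA_spec (edges.length + 1) edges i hilen hokN (by omega)
  rw [update_edge, hidx, hA]
  simp only [Option.map_some, Option.getD_some]
  -- B computes gval
  simp only [update_edge_alt]
  have hlenh : (((List.range edges.length).reverse).foldl
      (stepB edges.length edges) (List.replicate edges.length 0)).length = edges.length := by
    rw [foldl_stepB_length, List.length_replicate]
  rw [PySem.List.pyGet?_natCast]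
  have hB := B_inv edges.length edges edges.length (List.replicate edges.length 0)
    (List.length_replicate) (fun k h1 h2 _ => by omega) i hilen hokN
  rw [List.getD] at hB
  rw [← hB]
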